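-- pv_equiv track=rewrite | github.com/yichigo/Google-Foobar | foobar_5_1.py | solution
-- ===== SOURCE A (Python) =====
-- def intPartitions(n, minSize = 1):
--     # INPUT : integer "n", minimum partition size "minSize"
--     # OUTPUT: list[list of integer partition]
--     result = [[n]]
--     # iterate 1st partition's size
--     for n1 in range(minSize, n//2 + 1):
--         result.extend([ [n1] + pRes for pRes in intPartitions(n - n1, minSize = n1) ])
--     return result
--
-- def countPermutations(disjointCyclePartition):
--     # INPUT : list of disjoint cycle partition
--     # OUTPUT: number of permutations for this partition
--     # for 1st cycle (size = n1)
--     # number of choices = n!/(n1!(n-n1)!)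
--     # number of orders  = n1!/n1
--     # so, 1st cycle's number of permutations = n!/n1/(n-n1)!
--     # so, 2nd cycle's number of permutations = (n-n1)!/n2/(n-n1-n2)!
--     # ......
--     # Vanish common factors:
--     # so, number of permutations = n!/(n1*n2....)
--     # Remove duplicated countings:
--     # so, number of permutations = n!/(n1*n2....)/(count(distinct n1)!*...)
--     n = sum(disjointCyclePartition)
--     counts = {}
--     result = factorial(n)
--     for ni in disjointCyclePartition:
--         counts[ni] = counts.get(ni, 0) + 1
--         result //= ni * counts[ni]
--     return result
--
-- def factorial(n):
--     if n == 0: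
--         return 1
--     return n * factorial(n-1)
--
-- def gcd(a, b):
--     if a == 0:
--         return b
--     return gcd(b % a, a)
--
-- def solution(w, h, s):
--     # Define a map X: A -> S
--     # where A is the set of elements in matrix, S is the set of states
--     # Define a permutation group G = {g}
--     # where g is a permutation of A
--
--     # Burnside's Lemma:
--     # num of orbits |X/G| = SUM_g{num of fixed points of g} / |G|
--
--     # Polya Enumeration Theorem:
--     # num of orbits |X/G| = SUM_g{|S|^c(g)} / |G|
--     # where c(g) is the number of cycles of g
--
--     # |G|
--     sizeG = factorial(w)*factorial(h)
--     # initialize the number of fixed points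
--     numFixedPoint = 0
--     # iterate disjoint cycle partitions
--     for p1 in intPartitions(w):
--         for p2 in intPartitions(h):
--             cg = sum([ sum([ gcd(n1, n2) for n1 in p1 ]) for n2 in p2 ])
--             numFixedPoint += (s**cg) * countPermutations(p1) * countPermutations(p2)
--     numOrbit = numFixedPoint // sizeG
--     return str(numOrbit)
-- ===== SOURCE B (Python) =====
-- def solution(w, h, s):
--     # Memoized bottom-up partition table instead of naive recursion; iterative
--     # factorial/gcd; per-partition weights computed once instead of in the inner loop.
--
--     def fact(n):
--         r = 1
--         for i in range(1, n + 1):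
--             r *= i
--         return r
--
--     def gcd(a, b):
--         while a:
--             a, b = b % a, a
--         return b
--
--     def partitions(n):
--         # T[m][k-1] = ascending partitions of m with parts >= k (1 <= k <= m)
--         T = [[]]
--         for m in range(1, n + 1):
--             row = [[[m]] + [[n1] + p
--                             for n1 in range(k, m // 2 + 1)
--                             for p in T[m - n1][n1 - 1]]
--                    for k in range(1, m + 1)]
--             T.append(row)
--         return T[n][0]
--
--     def weight(p):
--         counts = {}
--         d = 1
--         for ni in p:
--             counts[ni] = counts.get(ni, 0) + 1
--             d *= ni * counts[ni]
--         return fact(sum(p)) // d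
--
--     ps1 = [(p, weight(p)) for p in partitions(w)]
--     ps2 = [(q, weight(q)) for q in partitions(h)]
--     total = 0
--     for p1, c1 in ps1:
--         for p2, c2 in ps2:
--             cg = 0
--             for n1 in p1:
--                 for n2 in p2:
--                     cg += gcd(n1, n2)
--             total += s ** cg * c1 * c2
--     return str(total // (fact(w) * fact(h)))
-- ===== Notes on version B (the rewrite author's own statement) =====
-- stated objective: faster
-- what changed: The naive recursive partition enumerator (which recomputes each subproblem once per recursion path) is replaced by a bottom-up memoized DP table built iteratively; factorial and gcd become iterative loops; and countPermutations is replaced by a single-division weight computed once per partition outside the double loop instead of once per (p1,p2) pair.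
import Mathlib
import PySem

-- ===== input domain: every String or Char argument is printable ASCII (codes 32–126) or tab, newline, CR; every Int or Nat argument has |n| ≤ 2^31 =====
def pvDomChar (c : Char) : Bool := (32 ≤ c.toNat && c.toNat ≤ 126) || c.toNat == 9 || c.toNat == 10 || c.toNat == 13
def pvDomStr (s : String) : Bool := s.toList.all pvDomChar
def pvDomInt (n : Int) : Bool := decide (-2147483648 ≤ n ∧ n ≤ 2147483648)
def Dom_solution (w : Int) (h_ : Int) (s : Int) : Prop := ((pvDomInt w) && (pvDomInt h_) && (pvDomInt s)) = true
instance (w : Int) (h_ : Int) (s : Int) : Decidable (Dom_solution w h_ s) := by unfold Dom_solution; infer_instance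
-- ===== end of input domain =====

-- B replaces A's naive recursive partition enumerator by a bottom-up memoized table,
-- makes factorial/gcd iterative and computes each partition's weight once (objective: faster).

-- ===== PORT A =====
-- factorial(n), recursive; fuel n.toNat+1 suffices for every n ≥ 0 reached inside Pre_
-- (Python's factorial hits the recursion limit for n < 0, which Pre_ excludes).
def factAuxA : Nat → Int → Int
  | 0, _ => 0
  | f + 1, n => if n = 0 then 1 else n * factAuxA f (n - 1)

def factorialA (n : Int) : Int := factAuxA (n.toNat + 1) n

-- gcd(a, b), recursive; for a ≥ 0 (the only arguments reached) the first argument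
-- strictly decreases, so fuel a.toNat+1 suffices.
def gcdAuxA : Nat → Int → Int → Int
  | 0, _, b => b
  | f + 1, a, b => if a = 0 then b else gcdAuxA f (PySem.Int.mod b a) a

def gcdA (a b : Int) : Int := gcdAuxA (a.toNat + 1) a b

-- intPartitions(n, minSize); fuel n.toNat+1 suffices for minSize ≥ 1 (the recursive
-- call's first argument n - n1 satisfies (n - n1).toNat < n.toNat).
def ipAuxA : Nat → Int → Int → List (List Int)
  | 0, n, _ => [[n]]
  | f + 1, n, minSize =>
      (PySem.List.pyRange minSize (PySem.Int.floordiv n 2 + 1) 1).foldl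
        (fun result n1 => result ++ (ipAuxA f (n - n1) n1).map (fun p => n1 :: p)) [[n]]

def intPartitionsA (n : Int) (minSize : Int) : List (List Int) :=
  ipAuxA (n.toNat + 1) n minSize

-- countPermutations(p): dict of counts, result //= ni * counts[ni]
def countPermutationsA (p : List Int) : Int :=
  let n := p.sum
  (p.foldl
    (fun (st : PySem.Dict Int Int × Int) ni =>
      let counts := st.1.insert ni (st.1.getD ni 0 + 1)
      (counts, PySem.Int.floordiv st.2 (ni * counts.getD ni 0)))
    (PySem.Dict.empty, factorialA n)).2

-- s ** cg is ported as s ^ cg.toNat, exact since cg ≥ 0 on every input reached (sum of gcds of positive parts)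
def solution (w : Int) (h_ : Int) (s : Int) : String :=
  let sizeG := factorialA w * factorialA h_
  let numFixedPoint :=
    (intPartitionsA w 1).foldl (fun acc p1 =>
      (intPartitionsA h_ 1).foldl (fun acc2 p2 =>
        let cg := (p2.map (fun n2 => (p1.map (fun n1 => gcdA n1 n2)).sum)).sum
        acc2 + s ^ cg.toNat * countPermutationsA p1 * countPermutationsA p2) acc) 0
  PySem.Int.toStr (PySem.Int.floordiv numFixedPoint sizeG)

-- ===== PORT B =====
-- fact(n): iterative running product
def factB (n : Int) : Int :=
  (PySem.List.pyRange 1 (n + 1) 1).foldl (fun r i => r * i) 1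

-- gcd(a, b): while-loop Euclid; fuel a.toNat+1 suffices for a ≥ 0 (first argument decreases)
def gcdAuxB : Nat → Int → Int → Int
  | 0, _, b => b
  | f + 1, a, b => if a ≠ 0 then gcdAuxB f (PySem.Int.mod b a) a else b

def gcdB (a b : Int) : Int := gcdAuxB (a.toNat + 1) a b

-- partitions(n): memoized bottom-up table T, T[m][k-1] = partitions of m with parts ≥ k.
-- Python's in-range indexing T[m-n1][n1-1] and T[n][0] is ported with pyGetD (all the
-- indices are in range for the arguments reached inside Pre_).
def tableStepB (T : List (List (List (List Int)))) (m : Int) : List (List (List (List Int))) :=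
  T ++ [(PySem.List.pyRange 1 (m + 1) 1).map (fun k =>
          [[m]] ++ (PySem.List.pyRange k (PySem.Int.floordiv m 2 + 1) 1).flatMap
            (fun n1 =>
              (PySem.List.pyGetD (PySem.List.pyGetD T (m - n1) []) (n1 - 1) []).map
                (fun p => n1 :: p)))]

def partitionsB (n : Int) : List (List Int) :=
  let T := (PySem.List.pyRange 1 (n + 1) 1).foldl tableStepB [[]]
  PySem.List.pyGetD (PySem.List.pyGetD T n []) 0 []

-- weight(p): same counting dict, but a running product d and ONE final division
def weightB (p : List Int) : Int :=
  let st := p.foldl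
    (fun (st : PySem.Dict Int Int × Int) ni =>
      let counts := st.1.insert ni (st.1.getD ni 0 + 1)
      (counts, st.2 * (ni * counts.getD ni 0)))
    (PySem.Dict.empty, 1)
  PySem.Int.floordiv (factB p.sum) st.2

-- s ** cg is ported as s ^ cg.toNat, exact since cg ≥ 0 on every input reached
def solution_alt (w : Int) (h_ : Int) (s : Int) : String :=
  let ps1 := (partitionsB w).map (fun p => (p, weightB p))
  let ps2 := (partitionsB h_).map (fun q => (q, weightB q))
  let total := ps1.foldl (fun acc pc1 =>
    ps2.foldl (fun acc2 pc2 =>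
      let cg := pc1.1.foldl (fun c n1 => pc2.1.foldl (fun c2 n2 => c2 + gcdB n1 n2) c) 0
      acc2 + s ^ cg.toNat * pc1.2 * pc2.2) acc) 0
  PySem.Int.toStr (PySem.Int.floordiv total (factB w * factB h_))

-- ===== PRECONDITION & SPEC =====
-- Pre_: the Python A returns only for w ≥ 1 and h ≥ 1 (w = 0 or h = 0 divides by zero
-- in countPermutations; negative w or h hit the recursion limit in factorial).
def Pre_solution (w : Int) (h_ : Int) (s : Int) : Prop := 1 ≤ w ∧ 1 ≤ h_
instance (w : Int) (h_ : Int) (s : Int) : Decidable (Pre_solution w h_ s) := by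
  unfold Pre_solution; infer_instance

def pvWitness_solution : Int × Int × Int := (2, 2, 3)

def Spec_solution (w : Int) (h_ : Int) (s : Int) (out : String) : Prop := out = solution_alt w h_ s
instance (w : Int) (h_ : Int) (s : Int) (out : String) : Decidable (Spec_solution w h_ s out) := by
  unfold Spec_solution; infer_instance

-- ===== CLAIM (what is proved, stated in full; the proofs are below) =====
def Claim_equal_solution : Prop := ∀ (w : Int) (h_ : Int) (s : Int), Dom_solution w h_ s → Pre_solution w h_ s → Spec_solution w h_ s (solution w h_ s)

-- ===== LEMMAS AND PROOFS =====

theorem factA_nat (m : Nat) : factorialA (m : Int) = (Nat.factorial m : Int) := by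
  induction m with
  | zero => decide
  | succ m ih =>
    unfold factorialA at *
    have h1 : ((m + 1 : Nat) : Int).toNat = m + 1 := by simp
    have h2 : ((m : Nat) : Int).toNat = m := by simp
    rw [h1]
    show factAuxA (m + 2) (↑(m+1)) = _
    rw [show factAuxA (m + 2) (↑(m+1)) = if ((m+1:Nat):Int) = 0 then 1 else ((m+1:Nat):Int) * factAuxA (m+1) (((m+1:Nat):Int) - 1) from rfl]
    have h3 : ((m+1:Nat):Int) - 1 = (m:Int) := by push_cast; ring
    rw [h3]
    simp only [h2] at ih
    rw [if_neg (by positivity), ih, Nat.factorial_succ]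
    push_cast; ring

theorem factB_nat (m : Nat) : factB (m : Int) = (Nat.factorial m : Int) := by
  induction m with
  | zero => decide
  | succ m ih =>
    unfold factB at *
    have h1 : ((m + 1 : Nat) : Int) + 1 = ((m:Int) + 1) + 1 := by push_cast; ring
    rw [h1, PySem.List.pyRange_one_succ_right (by omega), List.foldl_append]
    simp only [List.foldl]
    rw [show ((m:Int) + 1) = ((m+1 : Nat) : Int) by push_cast; ring] at *
    rw [ih, Nat.factorial_succ]
    push_cast; ring

theorem gcdAux_eq (f : Nat) : ∀ (a b : Int), gcdAuxA f a b = gcdAuxB f a b := by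
  induction f with
  | zero => intro a b; rfl
  | succ f ih =>
    intro a b
    show (if a = 0 then b else gcdAuxA f (PySem.Int.mod b a) a)
      = (if a ≠ 0 then gcdAuxB f (PySem.Int.mod b a) a else b)
    by_cases h : a = 0 <;> simp [h, ih]

theorem gcdB_eq_gcdA : gcdB = gcdA := by
  funext a b; exact (gcdAux_eq _ a b).symm

-- bounds for an index drawn from the partition loop's range
theorem range_bounds {n k n1 : Int} (hk : 1 ≤ k)
    (h : n1 ∈ PySem.List.pyRange k (PySem.Int.floordiv n 2 + 1) 1) :
    1 ≤ n1 ∧ 2 * n1 ≤ n := by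
  rw [PySem.List.mem_pyRange_one] at h
  have h4 : PySem.Int.floordiv n 2 = n / 2 := PySem.Int.floordiv_eq_ediv_of_pos (by omega)
  omega

theorem ipAuxA_fuel (f : Nat) : ∀ (n k : Int), 1 ≤ k → n.toNat < f →
    ipAuxA f n k = ipAuxA (n.toNat + 1) n k := by
  induction f using Nat.strong_induction_on with
  | _ f IH =>
    intro n k hk hf
    match f, hf with
    | f + 1, hf =>
      show (PySem.List.pyRange k (PySem.Int.floordiv n 2 + 1) 1).foldl
        (fun result n1 => result ++ (ipAuxA f (n - n1) n1).map (fun p => n1 :: p)) [[n]] = _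
      rw [show ipAuxA (n.toNat + 1) n k = (PySem.List.pyRange k (PySem.Int.floordiv n 2 + 1) 1).foldl
        (fun result n1 => result ++ (ipAuxA n.toNat (n - n1) n1).map (fun p => n1 :: p)) [[n]] from rfl]
      apply PySem.List.foldl_congr_mem
      intro acc n1 hmem
      have hb := range_bounds hk hmem
      have hlt : (n - n1).toNat < n.toNat := by omega
      rw [IH f (by omega) (n - n1) n1 (by omega) (by omega),
          IH n.toNat (by omega) (n - n1) n1 (by omega) (by omega)]

theorem ipAuxA_parts_pos (f : Nat) : ∀ (n k : Int), 1 ≤ k → 1 ≤ n →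
    ∀ p ∈ ipAuxA f n k, ∀ x ∈ p, 1 ≤ x := by
  induction f with
  | zero =>
    intro n k hk hn p hp x hx
    simp only [ipAuxA, List.mem_singleton] at hp
    subst hp; simp only [List.mem_singleton] at hx; omega
  | succ f ih =>
    intro n k hk hn p hp x hx
    rw [show ipAuxA (f+1) n k = (PySem.List.pyRange k (PySem.Int.floordiv n 2 + 1) 1).foldl
        (fun result n1 => result ++ (ipAuxA f (n - n1) n1).map (fun q => n1 :: q)) [[n]] from rfl,
      PySem.List.foldl_append_eq_flatMap] at hp
    rcases List.mem_append.1 hp with h | h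
    · simp only [List.mem_singleton] at h; subst h
      simp only [List.mem_singleton] at hx; omega
    · rw [List.mem_flatMap] at h
      obtain ⟨n1, hn1, hpm⟩ := h
      have hb := range_bounds hk hn1
      rw [List.mem_map] at hpm
      obtain ⟨q, hq, rfl⟩ := hpm
      rcases List.mem_cons.1 hx with rfl | hxq
      · omega
      · exact ih (n - n1) n1 (by omega) (by omega) q hq x hxq

-- the table invariant of B's DP
def InvB (T : List (List (List (List Int)))) (M : Nat) : Prop :=
  T.length = M + 1 ∧
  ∀ (j k : Nat), j ≤ M → 1 ≤ k → k ≤ j →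
    PySem.List.pyGetD (PySem.List.pyGetD T (j : Int) []) ((k : Int) - 1) [] =
      intPartitionsA (j : Int) (k : Int)

theorem tableStep_inv {T : List (List (List (List Int)))} {M : Nat} (h : InvB T M) :
    InvB (tableStepB T ((M : Int) + 1)) (M + 1) := by
  obtain ⟨hlen, hinv⟩ := h
  constructor
  · simp [tableStepB, hlen]
  · intro j k hj hk hkj
    by_cases hjM : j ≤ M
    · rw [show PySem.List.pyGetD (tableStepB T ((M : Int) + 1)) (j : Int) []
          = PySem.List.pyGetD T (j : Int) [] by
        simp only [PySem.List.pyGetD_natCast, tableStepB]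
        rw [List.getD_append _ _ _ _ (by omega)]]
      exact hinv j k hjM hk hkj
    · have hj1 : j = M + 1 := by omega
      subst hj1
      have hrow : PySem.List.pyGetD (tableStepB T ((M : Int) + 1)) ((M + 1 : Nat) : Int) []
          = (PySem.List.pyRange 1 (((M : Int) + 1) + 1) 1).map (fun k' =>
              [[(M : Int) + 1]] ++ (PySem.List.pyRange k' (PySem.Int.floordiv ((M : Int) + 1) 2 + 1) 1).flatMap
                (fun n1 =>
                  (PySem.List.pyGetD (PySem.List.pyGetD T (((M : Int) + 1) - n1) []) (n1 - 1) []).map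
                    (fun p => n1 :: p))) := by
        simp only [PySem.List.pyGetD_natCast, tableStepB]
        rw [List.getD_append_right _ _ _ _ (by omega)]
        simp [hlen]
      rw [hrow]
      have hidx : ((k : Nat) : Int) - 1 = (((k - 1 : Nat)) : Int) := by omega
      rw [hidx, PySem.List.pyGetD_map_pyRange_one _ 1 (((M : Int) + 1) + 1) (k - 1) [] (by omega)]
      have hk' : (1 : Int) + ((k - 1 : Nat) : Int) = (k : Int) := by omega
      rw [hk']
      have hcast : ((M + 1 : Nat) : Int) = (M : Int) + 1 := by push_cast; ring
      rw [hcast, show intPartitionsA ((M : Int) + 1) (k : Int)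
          = ipAuxA ((((M : Int) + 1)).toNat + 1) ((M : Int) + 1) (k : Int) from rfl,
        show ((((M : Int) + 1)).toNat + 1) = M + 2 by omega]
      rw [show ipAuxA (M + 2) ((M : Int) + 1) (k : Int)
          = (PySem.List.pyRange (k : Int) (PySem.Int.floordiv ((M : Int) + 1) 2 + 1) 1).foldl
              (fun result n1 => result ++ (ipAuxA (M + 1) (((M : Int) + 1) - n1) n1).map
                (fun p => n1 :: p)) [[(M : Int) + 1]] from rfl,
        PySem.List.foldl_append_eq_flatMap]
      congr 1
      apply List.flatMap_congr
      intro n1 hn1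
      have hb := range_bounds (by exact_mod_cast Nat.one_le_cast.mpr hk : (1:Int) ≤ (k:Int)) hn1
      have hjk : ∃ (j' k' : Nat), ((j' : Nat) : Int) = ((M : Int) + 1) - n1 ∧ ((k' : Nat) : Int) = n1 :=
        ⟨(((M : Int) + 1) - n1).toNat, n1.toNat, by omega, by omega⟩
      obtain ⟨j', k', hj', hk'2⟩ := hjk
      rw [← hj', ← hk'2]
      rw [hinv j' k' (by omega) (by omega) (by omega)]
      rw [show intPartitionsA ((j' : Nat) : Int) ((k' : Nat) : Int)
          = ipAuxA ((((j' : Nat) : Int)).toNat + 1) ((j' : Nat) : Int) ((k' : Nat) : Int) from rfl]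
      rw [ipAuxA_fuel (M + 1) _ _ (by omega) (by omega)]

theorem tableB_inv (N : Nat) :
    InvB ((PySem.List.pyRange 1 ((N : Int) + 1) 1).foldl tableStepB [[]]) N := by
  induction N with
  | zero =>
    rw [show ((0 : Nat) : Int) + 1 = 1 by norm_num, PySem.List.pyRange_one_eq_nil (by omega)]
    exact ⟨rfl, fun j k hj hk hkj => by omega⟩
  | succ N ih =>
    rw [show ((N + 1 : Nat) : Int) + 1 = ((N : Int) + 1) + 1 by push_cast; ring,
      PySem.List.pyRange_one_succ_right (by omega), List.foldl_append]
    exact tableStep_inv ih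

theorem partitionsB_eq (n : Int) (hn : 1 ≤ n) : partitionsB n = intPartitionsA n 1 := by
  have hcast : n = ((n.toNat : Nat) : Int) := by omega
  have h := (tableB_inv n.toNat).2 n.toNat 1 (le_refl _) (le_refl _) (by omega)
  unfold partitionsB
  rw [hcast]
  rw [show (((1 : Nat) : Int)) - 1 = (0 : Int) by norm_num] at h
  exact_mod_cast h

-- the counting loops of countPermutations / weight
def stepA (st : PySem.Dict Int Int × Int) (ni : Int) : PySem.Dict Int Int × Int :=
  let counts := st.1.insert ni (st.1.getD ni 0 + 1)
  (counts, PySem.Int.floordiv st.2 (ni * counts.getD ni 0))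
def stepB (st : PySem.Dict Int Int × Int) (ni : Int) : PySem.Dict Int Int × Int :=
  let counts := st.1.insert ni (st.1.getD ni 0 + 1)
  (counts, st.2 * (ni * counts.getD ni 0))

theorem stepB_mul (p : List Int) : ∀ (d : PySem.Dict Int Int) (a b : Int),
    (p.foldl stepB (d, a * b)).2 = a * (p.foldl stepB (d, b)).2 := by
  induction p with
  | nil => intro d a b; rfl
  | cons ni t ih =>
    intro d a b
    simp only [List.foldl_cons, stepB]
    rw [show a * b * (ni * ((d.insert ni (d.getD ni 0 + 1)).getD ni 0))
        = a * (b * (ni * ((d.insert ni (d.getD ni 0 + 1)).getD ni 0))) by ring]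
    exact ih _ _ _

def countsNN (d : PySem.Dict Int Int) : Prop := ∀ k, 0 ≤ d.getD k 0

theorem countsNN_insert {d : PySem.Dict Int Int} (h : countsNN d) (ni : Int) :
    countsNN (d.insert ni (d.getD ni 0 + 1)) := by
  intro k
  rw [PySem.Dict.getD_insert]
  split_ifs with hk
  · have := h ni; omega
  · exact h k

theorem stepB_pos (p : List Int) : ∀ (d : PySem.Dict Int Int) (acc : Int),
    (∀ x ∈ p, 1 ≤ x) → countsNN d → 1 ≤ acc → 1 ≤ (p.foldl stepB (d, acc)).2 := by
  induction p with
  | nil => intro d acc _ _ h; exact h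
  | cons ni t ih =>
    intro d acc hp hd hacc
    simp only [List.foldl_cons, stepB]
    apply ih _ _ (fun x hx => hp x (List.mem_cons_of_mem _ hx)) (countsNN_insert hd ni)
    have h1 : 1 ≤ ni := hp ni List.mem_cons_self
    have h2 : (d.insert ni (d.getD ni 0 + 1)).getD ni 0 = d.getD ni 0 + 1 :=
      PySem.Dict.getD_insert_self _ _ _ _
    have h3 := hd ni
    rw [h2]
    have : 0 < acc * (ni * (d.getD ni 0 + 1)) :=
      mul_pos (by omega) (mul_pos (by omega) (by omega))
    omega

theorem stepAB (p : List Int) : ∀ (d : PySem.Dict Int Int) (r : Int),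
    (∀ x ∈ p, 1 ≤ x) → countsNN d → 0 ≤ r →
    (p.foldl stepA (d, r)).2 = PySem.Int.floordiv r (p.foldl stepB (d, 1)).2 := by
  induction p with
  | nil =>
    intro d r _ _ _
    show r = PySem.Int.floordiv r 1
    rw [PySem.Int.floordiv_eq_ediv_of_pos (by omega)]; omega
  | cons ni t ih =>
    intro d r hp hd hr
    have h1 : 1 ≤ ni := hp ni List.mem_cons_self
    have h2 : (d.insert ni (d.getD ni 0 + 1)).getD ni 0 = d.getD ni 0 + 1 :=
      PySem.Dict.getD_insert_self _ _ _ _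
    have hdni := hd ni
    set q : Int := ni * ((d.insert ni (d.getD ni 0 + 1)).getD ni 0) with hq
    have hqpos : 1 ≤ q := by
      rw [hq, h2]
      have : 0 < ni * (d.getD ni 0 + 1) := mul_pos (by omega) (by omega)
      omega
    have ht : ∀ x ∈ t, (1:Int) ≤ x := fun x hx => hp x (List.mem_cons_of_mem _ hx)
    have hd' := countsNN_insert hd ni
    simp only [List.foldl_cons, stepA, stepB]
    rw [show (1:Int) * q = q * 1 by ring] at *
    have hB : (t.foldl stepB (d.insert ni (d.getD ni 0 + 1), q * 1)).2
        = q * (t.foldl stepB (d.insert ni (d.getD ni 0 + 1), 1)).2 := stepB_mul _ _ _ _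
    rw [hB]
    set P : Int := (t.foldl stepB (d.insert ni (d.getD ni 0 + 1), 1)).2 with hP
    have hPpos : 1 ≤ P := stepB_pos _ _ _ ht hd' (by omega)
    rw [ih _ _ ht hd' (by
      rw [PySem.Int.floordiv_eq_ediv_of_pos (by omega)]
      exact Int.ediv_nonneg hr (by omega))]
    rw [PySem.Int.floordiv_eq_ediv_of_pos (by omega),
        PySem.Int.floordiv_eq_ediv_of_pos (by omega),
        PySem.Int.floordiv_eq_ediv_of_pos (by positivity)]
    exact Int.ediv_ediv_of_nonneg (by omega)

theorem sum_nonneg_of_pos (p : List Int) (hp : ∀ x ∈ p, 1 ≤ x) : 0 ≤ p.sum := by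
  induction p with
  | nil => simp
  | cons a t ih =>
    simp only [List.sum_cons]
    have := hp a List.mem_cons_self
    have := ih (fun x hx => hp x (List.mem_cons_of_mem _ hx))
    omega

theorem weightB_eq (p : List Int) (hp : ∀ x ∈ p, 1 ≤ x) :
    weightB p = countPermutationsA p := by
  have hsum : 0 ≤ p.sum := sum_nonneg_of_pos p hp
  have hfact : factB p.sum = factorialA p.sum := by
    rw [show p.sum = ((p.sum.toNat : Nat) : Int) by omega, factB_nat, factA_nat]
  have hA : countPermutationsA p = (p.foldl stepA (PySem.Dict.empty, factorialA p.sum)).2 := rfl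
  have hB : weightB p = PySem.Int.floordiv (factB p.sum) (p.foldl stepB (PySem.Dict.empty, 1)).2 := rfl
  rw [hA, hB, hfact]
  have hNN : countsNN PySem.Dict.empty := by intro k; rw [PySem.Dict.getD_empty]
  have hfnn : 0 ≤ factorialA p.sum := by
    rw [show p.sum = ((p.sum.toNat : Nat) : Int) by omega, factA_nat]; positivity
  rw [stepAB p _ _ hp hNN hfnn]

theorem sum_swap_int (p1 p2 : List Int) (g : Int → Int → Int) :
    (p1.map (fun a => (p2.map (g a)).sum)).sum = (p2.map (fun b => (p1.map (fun a => g a b)).sum)).sum := by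
  induction p1 with
  | nil => simp
  | cons a t ih => simp [ih]

theorem cg_eq (p1 p2 : List Int) (g : Int → Int → Int) :
    p1.foldl (fun c n1 => p2.foldl (fun c2 n2 => c2 + g n1 n2) c) 0 =
      (p2.map (fun n2 => (p1.map (fun n1 => g n1 n2)).sum)).sum := by
  have h1 : p1.foldl (fun c n1 => p2.foldl (fun c2 n2 => c2 + g n1 n2) c) 0
      = p1.foldl (fun c n1 => c + (p2.map (g n1)).sum) 0 := by
    apply PySem.List.foldl_congr_mem
    intro acc x hx
    rw [PySem.List.foldl_add]
  rw [h1, PySem.List.foldl_add, sum_swap_int]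
  simp

-- ===== VERDICT (by name: the statement is the Claim_ definition above) =====
theorem solution_spec : Claim_equal_solution := by
  intro w h_ s hdom hpre
  obtain ⟨hw, hh⟩ := hpre
  unfold Spec_solution solution solution_alt
  rw [partitionsB_eq w hw, partitionsB_eq h_ hh]
  simp only [List.foldl_map]
  have hparts1 : ∀ p ∈ intPartitionsA w 1, ∀ x ∈ p, (1:Int) ≤ x :=
    ipAuxA_parts_pos _ w 1 (by omega) hw
  have hparts2 : ∀ p ∈ intPartitionsA h_ 1, ∀ x ∈ p, (1:Int) ≤ x :=
    ipAuxA_parts_pos _ h_ 1 (by omega) hh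
  have hfold : (intPartitionsA w 1).foldl (fun acc p1 =>
      (intPartitionsA h_ 1).foldl (fun acc2 p2 =>
        acc2 + s ^ ((p2.map (fun n2 => (p1.map (fun n1 => gcdA n1 n2)).sum)).sum).toNat
          * countPermutationsA p1 * countPermutationsA p2) acc) 0
      = (intPartitionsA w 1).foldl (fun acc p1 =>
      (intPartitionsA h_ 1).foldl (fun acc2 p2 =>
        acc2 + s ^ ((p1.foldl (fun c n1 => p2.foldl (fun c2 n2 => c2 + gcdB n1 n2) c) 0)).toNat
          * weightB p1 * weightB p2) acc) 0 := by
    apply PySem.List.foldl_congr_mem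
    intro acc p1 hp1
    apply PySem.List.foldl_congr_mem
    intro acc2 p2 hp2
    rw [cg_eq p1 p2 gcdB, gcdB_eq_gcdA,
        weightB_eq p1 (hparts1 p1 hp1), weightB_eq p2 (hparts2 p2 hp2)]
  rw [← hfold]
  have hsize : factorialA w * factorialA h_ = factB w * factB h_ := by
    rw [show w = ((w.toNat : Nat) : Int) by omega, show h_ = ((h_.toNat : Nat) : Int) by omega,
      factA_nat, factB_nat, factA_nat, factB_nat]
  rw [hsize]
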